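-- pv_equiv track=rewrite | github.com/ajanin/wordgames | solve.py | find_word_with_letters
-- ===== SOURCE A (Python) =====
-- def find_word_with_letters(words, letters):
--     bestword = None
--     bestcount = -1
--     for word in words:
--         count = len(set(word) & set(letters))
--         if count > bestcount:
--             bestcount = count
--             bestword = word
--
--     return bestword, bestcount
-- ===== SOURCE B (Python) =====
-- def find_word_with_letters(words, letters):
--     # Two-pass: build the count table once, then select max + first index.
--     if not words:
--         return None, -1
--     letterset = set(letters)
--     counts = [len(set(w) & letterset) for w in words]
--     bestcount = max(counts)
--     return words[counts.index(bestcount)], bestcount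
-- ===== Notes on version B (the rewrite author's own statement) =====
-- stated objective: faster
-- what changed: Replaces A's single-pass running-max loop with an empty guard plus a two-pass count-table-then-select structure (counts list, max(counts), counts.index), hoisting set(letters) out of the loop where A rebuilds it for every word.
import Mathlib
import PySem

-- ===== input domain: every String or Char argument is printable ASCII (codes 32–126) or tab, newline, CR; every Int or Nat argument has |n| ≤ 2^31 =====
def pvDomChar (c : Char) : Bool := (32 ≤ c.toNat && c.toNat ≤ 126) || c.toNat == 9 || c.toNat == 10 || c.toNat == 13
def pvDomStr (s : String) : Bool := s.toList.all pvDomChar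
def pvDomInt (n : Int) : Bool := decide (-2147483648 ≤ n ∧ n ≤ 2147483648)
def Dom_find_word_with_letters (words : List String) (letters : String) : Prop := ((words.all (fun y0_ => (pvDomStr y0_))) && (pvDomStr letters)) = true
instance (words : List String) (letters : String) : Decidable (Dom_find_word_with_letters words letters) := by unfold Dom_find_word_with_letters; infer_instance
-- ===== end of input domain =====

-- B: count-table + max + first-index (two passes, letter set hoisted out of the loop) instead of A's running-max loop; proved equal on all inputs.

-- len(set(w) & set(letters)) — shared by both Pythons verbatim
def pvCount (w : String) (letters : String) : Int :=
  ((PySem.Set.inter (PySem.Set.ofList w.toList) (PySem.Set.ofList letters.toList)).length : Int)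

-- ===== PORT A =====
-- loop body of A, named so the fold lemma below can talk about it
def stepA (letters : String) (st : Option String × Int) (word : String) : Option String × Int :=
  let count := pvCount word letters
  if count > st.2 then (some word, count) else st

def find_word_with_letters (words : List String) (letters : String) : Option String × Int :=
  words.foldl (stepA letters) ((none : Option String), (-1 : Int))

-- ===== PORT B =====
def find_word_with_letters_alt (words : List String) (letters : String) : Option String × Int :=
  match words with
  | [] => ((none : Option String), (-1 : Int))
  | x :: xs =>
    let counts := (x :: xs).map (fun w => pvCount w letters)
    match PySem.List.max? counts (fun y => y) with
    | none => ((none : Option String), (-1 : Int))      -- unreachable: counts is nonempty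
    | some m =>
      match PySem.List.index? counts m with
      | none => ((none : Option String), (-1 : Int))    -- unreachable: m is in counts
      | some i => (PySem.List.pyGet? (x :: xs) (i : Int), m)

-- ===== PRECONDITION & SPEC =====
def Spec_find_word_with_letters (words : List String) (letters : String) (out : Option String × Int) : Prop := out = find_word_with_letters_alt words letters
instance (words : List String) (letters : String) (out : Option String × Int) : Decidable (Spec_find_word_with_letters words letters out) := by unfold Spec_find_word_with_letters; infer_instance

-- ===== CLAIM (what is proved, stated in full; the proofs are below) =====
def Claim_equal_find_word_with_letters : Prop := ∀ (words : List String) (letters : String), Dom_find_word_with_letters words letters → Spec_find_word_with_letters words letters (find_word_with_letters words letters)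

-- ===== LEMMAS AND PROOFS =====

theorem pvCount_nonneg (w letters : String) : 0 ≤ pvCount w letters := by
  simp [pvCount]

theorem le_foldl_max' (l : List Int) (c : Int) : c ≤ l.foldl max c := by
  induction l generalizing c with
  | nil => simp
  | cons y ys ih => exact le_trans (le_max_left c y) (ih (max c y))

theorem foldl_max_mem (l : List Int) (c : Int) :
    l.foldl max c = c ∨ l.foldl max c ∈ l := by
  induction l generalizing c with
  | nil => simp
  | cons y ys ih =>
    rcases ih (max c y) with h | h
    · simp only [List.foldl_cons, h]
      by_cases hyc : y ≤ c
      · left; omega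
      · right
        rw [show max c y = y by omega]
        exact List.mem_cons_self
    · right; right; simpa using h

-- A's running-max loop, started at (some w, c), computed as max-then-first-index
theorem loop_eq (letters : String) (xs : List String) (w : String) (c : Int) :
    xs.foldl (stepA letters) ((some w : Option String), c)
    = (if c < (xs.map (fun w => pvCount w letters)).foldl max c then
         match List.idxOf? ((xs.map (fun w => pvCount w letters)).foldl max c)
               (xs.map (fun w => pvCount w letters)) with
         | some i => (xs[i]?, (xs.map (fun w => pvCount w letters)).foldl max c)
         | none => ((some w : Option String), c)
       else ((some w : Option String), c)) := by
  induction xs generalizing w c with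
  | nil => simp
  | cons y ys ih =>
    have hstep : stepA letters ((some w : Option String), c) y
        = if pvCount y letters > c then ((some y : Option String), pvCount y letters)
          else ((some w : Option String), c) := rfl
    simp only [List.foldl_cons, hstep, List.map_cons]
    by_cases h : pvCount y letters > c
    · rw [if_pos h, ih y (pvCount y letters)]
      have hmax : max c (pvCount y letters) = pvCount y letters := by omega
      simp only [hmax]
      set m := (ys.map (fun w => pvCount w letters)).foldl max (pvCount y letters) with hm
      have hle : pvCount y letters ≤ m := le_foldl_max' _ _
      rw [if_pos (by omega : c < m)]
      by_cases heq : pvCount y letters = m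
      · rw [if_neg (by omega : ¬ pvCount y letters < m)]
        rw [show List.idxOf? m (pvCount y letters :: ys.map (fun w => pvCount w letters)) = some 0 by
          simp [List.idxOf?_cons, heq]]
        simp [heq]
      · have hlt : pvCount y letters < m := by omega
        rw [if_pos hlt]
        have hmem : m ∈ ys.map (fun w => pvCount w letters) := by
          rcases foldl_max_mem (ys.map (fun w => pvCount w letters)) (pvCount y letters) with h' | h'
          · omega
          · exact h'
        rcases hidx : List.idxOf? m (ys.map (fun w => pvCount w letters)) with _ | i
        · exact absurd (List.idxOf?_eq_none_iff.mp hidx) (by simpa using hmem)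
        · rw [show List.idxOf? m (pvCount y letters :: ys.map (fun w => pvCount w letters))
              = some (i + 1) by simp [List.idxOf?_cons, heq, hidx]]
          simp
    · rw [if_neg h, ih w c]
      have hmax : max c (pvCount y letters) = c := by omega
      simp only [hmax]
      set m := (ys.map (fun w => pvCount w letters)).foldl max c with hm
      by_cases hcm : c < m
      · rw [if_pos hcm, if_pos hcm]
        have hne : pvCount y letters ≠ m := by omega
        rcases hidx : List.idxOf? m (ys.map (fun w => pvCount w letters)) with _ | i
        · have hmem : m ∈ ys.map (fun w => pvCount w letters) := by
            rcases foldl_max_mem (ys.map (fun w => pvCount w letters)) c with h' | h'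
            · omega
            · exact h'
          exact absurd (List.idxOf?_eq_none_iff.mp hidx) (by simpa using hmem)
        · rw [show List.idxOf? m (pvCount y letters :: ys.map (fun w => pvCount w letters))
              = some (i + 1) by simp [List.idxOf?_cons, hne, hidx]]
          simp
      · rw [if_neg hcm, if_neg hcm]

-- ===== VERDICT (by name: the statement is the Claim_ definition above) =====
theorem find_word_with_letters_spec : Claim_equal_find_word_with_letters := by
  intro words letters _
  unfold Spec_find_word_with_letters find_word_with_letters find_word_with_letters_alt
  cases words with
  | nil => rfl
  | cons x xs =>
    have h0 : pvCount x letters > (-1 : Int) :=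
      lt_of_lt_of_le (by norm_num) (pvCount_nonneg x letters)
    have hstep0 : stepA letters ((none : Option String), (-1 : Int)) x
        = ((some x : Option String), pvCount x letters) := by
      simp [stepA, h0]
    simp only [List.foldl_cons, hstep0, List.map_cons]
    rw [loop_eq letters xs x (pvCount x letters)]
    simp only [PySem.List.max?_id_cons, PySem.List.index?_eq_idxOf?]
    set m := (xs.map (fun w => pvCount w letters)).foldl max (pvCount x letters) with hm
    have hle : pvCount x letters ≤ m := le_foldl_max' _ _
    by_cases heq : pvCount x letters = m
    · rw [if_neg (by omega : ¬ pvCount x letters < m)]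
      rw [show List.idxOf? m (pvCount x letters :: xs.map (fun w => pvCount w letters)) = some 0 by
        simp [List.idxOf?_cons, heq]]
      simp [heq, PySem.List.pyGet?, PySem.List.pyIdx?]
    · have hlt : pvCount x letters < m := by omega
      rw [if_pos hlt]
      have hmem : m ∈ xs.map (fun w => pvCount w letters) := by
        rcases foldl_max_mem (xs.map (fun w => pvCount w letters)) (pvCount x letters) with h' | h'
        · omega
        · exact h'
      rcases hidx : List.idxOf? m (xs.map (fun w => pvCount w letters)) with _ | i
      · exact absurd (List.idxOf?_eq_none_iff.mp hidx) (by simpa using hmem)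
      · rw [show List.idxOf? m (pvCount x letters :: xs.map (fun w => pvCount w letters))
            = some (i + 1) by simp [List.idxOf?_cons, heq, hidx]]
        simp
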